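-- pv_equiv track=rewrite | github.com/Ashiq-am/Path-of-Python | 3.Data Types/Arrays Set 1 and Set 2/Prefix Sum/Maximize “10” Subsequences by replacing at most one 0 with 1/Maximize “10” Subsequences by replacing at most one 0 with 1.py | maximum_subseq
-- ===== SOURCE A (Python) =====
-- def maximum_subseq(s):
--     n = len(s)
--
--     # To store how many zero appear
--     # in front of that to form good pair
--     number_of_zero_suffix = []
--     for i in range(0, n + 1):
--         number_of_zero_suffix.append(0)
--
--     # Checking if its value is 0
--     number_of_zero_suffix[n - 1] = (s[n - 1] == '0')
--
--     for i in range(n - 2, -1, -1):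
--         number_of_zero_suffix[i] = number_of_zero_suffix[i + 1] + (s[i] == '0')
--
--     # Prefix array to count the number of
--     # '1' which appear before to it which
--     # would decrease the number of good pairs
--     number_of_one_prefix = []
--     for i in range(0, n):
--         number_of_one_prefix.append(0)
--
--     number_of_one_prefix[0] = (s[0] == '1')
--
--     for i in range(1, n):
--         number_of_one_prefix[i] = number_of_one_prefix[i - 1] + (s[i] == '1')
--
--     initial_answer = 0
--
--     for i in range(0, n):
--         if (s[i] == '1'):
--             # Counting initial answer in
--             # the original string
--             initial_answer += number_of_zero_suffix[i + 1]
--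
--     maxi = 0
--
--     profit = 0
--     loss = 0
--     for i in range(0, n):
--         if (s[i] == '0'):
--             if (i == n - 1):
--                 profit = 0
--             else:
--                 profit = number_of_zero_suffix[i + 1]
--             if (i == 0):
--                 loss = 0
--             else:
--                 loss = number_of_one_prefix[i - 1]
--
--             # Calculating net profit
--             net = profit - loss
--
--             # Storing maximum value of net
--             # profit after performing
--             # the operation.
--             maxi = max(maxi, net)
--
--     # Calculating final answer.
--     answer = initial_answer + maxi
--
--     return answer
-- ===== SOURCE B (Python) =====
-- def maximum_subseq(s):
--     # One forward pass with scalar accumulators instead of prefix/suffix arrays.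
--     total_zeros = sum(1 for c in s if c == '0')
--     ans = 0
--     best = 0
--     ones = 0
--     zeros = 0
--     for c in s:
--         if c == '1':
--             ans += total_zeros - zeros
--             ones += 1
--         elif c == '0':
--             zeros += 1
--             best = max(best, total_zeros - zeros - ones)
--     return ans + best
-- ===== Notes on version B (the rewrite author's own statement) =====
-- stated objective: simpler
-- what changed: Replaces A's two index-built prefix/suffix counting arrays and six index loops by a single forward pass over the characters keeping four scalar accumulators (total zeros, zeros seen, ones seen, running best net gain).
import Mathlib
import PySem

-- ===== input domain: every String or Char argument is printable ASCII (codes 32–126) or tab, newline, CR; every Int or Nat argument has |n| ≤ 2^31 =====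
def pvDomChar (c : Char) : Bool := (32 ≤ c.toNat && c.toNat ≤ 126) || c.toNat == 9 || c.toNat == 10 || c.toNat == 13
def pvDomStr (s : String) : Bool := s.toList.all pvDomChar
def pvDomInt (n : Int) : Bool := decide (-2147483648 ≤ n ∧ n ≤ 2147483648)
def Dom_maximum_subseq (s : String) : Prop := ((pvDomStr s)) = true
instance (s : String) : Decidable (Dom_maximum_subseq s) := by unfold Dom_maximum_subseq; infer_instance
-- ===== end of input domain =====

-- B replaces A's two index-built counting arrays and six index loops by one forward pass with
-- scalar accumulators; same return value on every non-empty string.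

-- ===== PORT A =====
-- Python's bool used as an int (True == 1, False == 0)
def pvB2i (b : Bool) : Int := if b then 1 else 0

-- the number_of_zero_suffix array: built as an append loop, then two index assignments exactly as in A
def pvZsuf (l : List Char) (n : Int) : List Int :=
  (PySem.List.pyRange (n - 2) (-1) (-1)).foldl
    (fun a i => PySem.List.pySetD a i
      (PySem.List.pyGetD a (i + 1) 0 + pvB2i (PySem.List.pyGetD l i ' ' == '0')))
    (PySem.List.pySetD ((PySem.List.pyRange 0 (n + 1) 1).foldl (fun a _ => a ++ [0]) []) (n - 1)
      (pvB2i (PySem.List.pyGetD l (n - 1) ' ' == '0')))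

-- the number_of_one_prefix array
def pvOpre (l : List Char) (n : Int) : List Int :=
  (PySem.List.pyRange 1 n 1).foldl
    (fun a i => PySem.List.pySetD a i
      (PySem.List.pyGetD a (i - 1) 0 + pvB2i (PySem.List.pyGetD l i ' ' == '1')))
    (PySem.List.pySetD ((PySem.List.pyRange 0 n 1).foldl (fun a _ => a ++ [0]) []) 0
      (pvB2i (PySem.List.pyGetD l 0 ' ' == '1')))

-- the initial_answer loop
def pvInitial (l : List Char) (zsuf : List Int) (n : Int) : Int :=
  (PySem.List.pyRange 0 n 1).foldl
    (fun acc i => if PySem.List.pyGetD l i ' ' == '1'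
      then acc + PySem.List.pyGetD zsuf (i + 1) 0 else acc) 0

-- the maxi/profit/loss loop (state = (maxi, profit, loss))
def pvSt (l : List Char) (zsuf opre : List Int) (n : Int) : Int × Int × Int :=
  (PySem.List.pyRange 0 n 1).foldl
    (fun (st : Int × Int × Int) i =>
      if PySem.List.pyGetD l i ' ' == '0' then
        (max st.1 ((if i == n - 1 then 0 else PySem.List.pyGetD zsuf (i + 1) 0) -
                   (if i == 0 then 0 else PySem.List.pyGetD opre (i - 1) 0)),
         (if i == n - 1 then 0 else PySem.List.pyGetD zsuf (i + 1) 0),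
         (if i == 0 then 0 else PySem.List.pyGetD opre (i - 1) 0))
      else st) (0, 0, 0)

def maximum_subseq (s : String) : Int :=
  let l := s.toList
  let n : Int := PySem.Chars.len l
  let zsuf := pvZsuf l n
  let opre := pvOpre l n
  pvInitial l zsuf n + (pvSt l zsuf opre n).1

-- ===== PORT B =====
def maximum_subseq_alt (s : String) : Int :=
  let l := s.toList
  let total : Int := l.foldl (fun acc c => if c == '0' then acc + 1 else acc) 0
  let st := l.foldl
    (fun (st : Int × Int × Int × Int) c =>
      if c == '1' then (st.1 + (total - st.2.2.2), st.2.1, st.2.2.1 + 1, st.2.2.2)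
      else if c == '0' then (st.1, max st.2.1 (total - (st.2.2.2 + 1) - st.2.2.1), st.2.2.1, st.2.2.2 + 1)
      else st) (0, 0, 0, 0)
  st.1 + st.2.1

-- ===== PRECONDITION & SPEC =====
-- Pre_ excludes only the empty string, on which A raises IndexError (it reads s[n-1]).
def Pre_maximum_subseq (s : String) : Prop := s.toList ≠ []
instance (s : String) : Decidable (Pre_maximum_subseq s) := by unfold Pre_maximum_subseq; infer_instance
def pvWitness_maximum_subseq : String := "1010"

def Spec_maximum_subseq (s : String) (out : Int) : Prop := out = maximum_subseq_alt s
instance (s : String) (out : Int) : Decidable (Spec_maximum_subseq s out) := by unfold Spec_maximum_subseq; infer_instance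

-- ===== CLAIM (what is proved, stated in full; the proofs are below) =====
def Claim_equal_maximum_subseq : Prop := ∀ (s : String), Dom_maximum_subseq s → Pre_maximum_subseq s → Spec_maximum_subseq s (maximum_subseq s)

-- ===== LEMMAS AND PROOFS =====

-- number of '0' (resp. '1') in a character list, as an Int
def pvCZ (l : List Char) : Int := (l.count '0' : Int)
def pvCO (l : List Char) : Int := (l.count '1' : Int)

-- the number of "10" subsequences of l
def pvAns : List Char → Int
  | [] => 0
  | c :: t => (if c == '1' then pvCZ t else 0) + pvAns t

-- running maximum of (zeros after − ones before) over the '0' positions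
def pvMax : Int → Int → List Char → Int
  | _, m, [] => m
  | ones, m, c :: t =>
    if c == '0' then pvMax ones (max m (pvCZ t - ones)) t
    else if c == '1' then pvMax (ones + 1) m t
    else pvMax ones m t

lemma pvCZ_cons (c : Char) (t : List Char) : pvCZ (c :: t) = (if c == '0' then 1 else 0) + pvCZ t := by
  simp [pvCZ, List.count_cons]; split <;> ring

lemma pvCO_cons (c : Char) (t : List Char) : pvCO (c :: t) = (if c == '1' then 1 else 0) + pvCO t := by
  simp [pvCO, List.count_cons]; split <;> ring

lemma pvCZ_drop (l : List Char) (m : Nat) (hm : m < l.length) :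
    pvCZ (l.drop m) = pvB2i (l.getD m ' ' == '0') + pvCZ (l.drop (m + 1)) := by
  simp only [pvCZ, pvB2i]
  rw [List.getD_eq_getElem l ' ' hm, List.drop_eq_getElem_cons hm, List.count_cons]
  by_cases hc : l[m] = '0' <;> simp [hc] <;> omega

lemma pvCO_take (l : List Char) (m : Nat) (hm : m < l.length) :
    pvCO (l.take (m + 1)) = pvCO (l.take m) + pvB2i (l.getD m ' ' == '1') := by
  simp only [pvCO, pvB2i]
  rw [List.getD_eq_getElem l ' ' hm, List.take_add_one, List.getElem?_eq_getElem hm]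
  simp only [Option.toList_some, List.count_append]
  by_cases hc : l[m] = '1' <;> simp [hc]

lemma pvRepl (m : Nat) (a : List Int) :
    (PySem.List.pyRange 0 (m : Int) 1).foldl (fun a _ => a ++ [0]) a = a ++ List.replicate m 0 := by
  rw [PySem.List.foldl_append_singleton_eq_map (f := fun _ => (0 : Int))]
  congr 1
  rw [List.map_const']
  simp [PySem.List.length_pyRange_one]

lemma pvZfold (l : List Char) :
    ∀ (m : Nat), m ≤ l.length → ∀ a : List Int, a.length = l.length + 1 →
    (∀ i : Nat, m ≤ i → i ≤ l.length → PySem.List.pyGetD a (i : Int) 0 = pvCZ (l.drop i)) →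
    ∀ i : Nat, i ≤ l.length →
      PySem.List.pyGetD
        ((PySem.List.pyRange ((m : Int) - 1) (-1) (-1)).foldl
          (fun a i => PySem.List.pySetD a i
            (PySem.List.pyGetD a (i + 1) 0 + pvB2i (PySem.List.pyGetD l i ' ' == '0'))) a)
        (i : Int) 0 = pvCZ (l.drop i) := by
  intro m
  induction m with
  | zero =>
    intro _ a _ hinv i hi
    rw [show ((0 : Nat) : Int) - 1 = -1 by norm_num, PySem.List.pyRange_neg_one_eq_nil (by omega)]
    exact hinv i (Nat.zero_le i) hi
  | succ m ih =>
    intro hm a hlen hinv i hi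
    rw [show ((m + 1 : Nat) : Int) - 1 = (m : Int) by push_cast; ring,
        PySem.List.pyRange_neg_one_cons (by omega), List.foldl_cons]
    set v := PySem.List.pyGetD a ((m : Int) + 1) 0 + pvB2i (PySem.List.pyGetD l (m : Int) ' ' == '0') with hv
    have hv' : v = pvCZ (l.drop m) := by
      rw [hv, show ((m : Int) + 1) = ((m + 1 : Nat) : Int) by push_cast; ring]
      rw [hinv (m + 1) (le_refl _) (by omega)]
      rw [PySem.List.pyGetD_natCast]
      rw [pvCZ_drop l m (by omega)]
      ring
    refine ih (by omega) (PySem.List.pySetD a ((m : Nat) : Int) v)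
      (by simp [PySem.List.pySetD_natCast, hlen]) ?_ i hi
    intro j hj hj2
    rw [PySem.List.pySetD_natCast]
    by_cases hjm : j = m
    · subst hjm
      rw [PySem.List.pyGetD_natCast, List.getD_eq_getElem _ _ (by simp [hlen]; omega),
          List.getElem_set_self]
      exact hv'
    · rw [PySem.List.pyGetD_natCast, List.getD_eq_getElem _ _ (by simp [hlen]; omega),
          List.getElem_set_ne (by omega)]
      have := hinv j (by omega) hj2
      rw [PySem.List.pyGetD_natCast, List.getD_eq_getElem _ _ (by omega)] at this
      exact this

lemma pvOfold (l : List Char) :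
    ∀ (k m : Nat), 1 ≤ m → m + k = l.length → ∀ a : List Int, a.length = l.length →
    (∀ i : Nat, i < m → PySem.List.pyGetD a (i : Int) 0 = pvCO (l.take (i + 1))) →
    ∀ i : Nat, i < l.length →
      PySem.List.pyGetD
        ((PySem.List.pyRange (m : Int) (l.length : Int) 1).foldl
          (fun a i => PySem.List.pySetD a i
            (PySem.List.pyGetD a (i - 1) 0 + pvB2i (PySem.List.pyGetD l i ' ' == '1'))) a)
        (i : Int) 0 = pvCO (l.take (i + 1)) := by
  intro k
  induction k with
  | zero =>
    intro m h1 hmk a hlen hinv i hi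
    rw [show (m : Int) = (l.length : Int) by omega, PySem.List.pyRange_one_eq_nil (by omega)]
    exact hinv i (by omega)
  | succ k ih =>
    intro m h1 hmk a hlen hinv i hi
    rw [PySem.List.pyRange_one_cons (by omega), List.foldl_cons]
    set v := PySem.List.pyGetD a ((m : Int) - 1) 0 + pvB2i (PySem.List.pyGetD l (m : Int) ' ' == '1') with hv
    have hv' : v = pvCO (l.take (m + 1)) := by
      rw [hv, show ((m : Int) - 1) = ((m - 1 : Nat) : Int) by omega]
      rw [hinv (m - 1) (by omega)]
      rw [PySem.List.pyGetD_natCast]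
      rw [show m - 1 + 1 = m by omega]
      exact (pvCO_take l m (by omega)).symm
    rw [show (m : Int) + 1 = ((m + 1 : Nat) : Int) by push_cast; ring]
    refine ih (m + 1) (by omega) (by omega) (PySem.List.pySetD a ((m : Nat) : Int) v)
      (by simp [PySem.List.pySetD_natCast, hlen]) ?_ i hi
    intro j hj
    rw [PySem.List.pySetD_natCast]
    by_cases hjm : j = m
    · subst hjm
      rw [PySem.List.pyGetD_natCast, List.getD_eq_getElem _ _ (by simp [hlen]; omega),
          List.getElem_set_self]
      exact hv'
    · rw [PySem.List.pyGetD_natCast, List.getD_eq_getElem _ _ (by simp [hlen]; omega),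
          List.getElem_set_ne (by omega)]
      have := hinv j (by omega)
      rw [PySem.List.pyGetD_natCast, List.getD_eq_getElem _ _ (by omega)] at this
      exact this

lemma pvFoldFst (L : List Int) (P : Int → Bool) (pr ls : Int → Int) :
    ∀ st : Int × Int × Int,
    (L.foldl (fun st i => if P i then (max st.1 (pr i - ls i), pr i, ls i) else st) st).1
      = L.foldl (fun m i => if P i then max m (pr i - ls i) else m) st.1 := by
  induction L with
  | nil => intro st; rfl
  | cons x t ih =>
    intro st
    simp only [List.foldl_cons]
    by_cases h : P x = true
    · simp only [h, if_true]; exact ih _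
    · simp only [eq_false_of_ne_true h]; exact ih st

lemma pvInitFold :
    ∀ (l : List Char) (acc : Int),
    (PySem.List.pyRange 0 (l.length : Int) 1).foldl
      (fun acc i => if PySem.List.pyGetD l i ' ' == '1'
        then acc + pvCZ (l.drop (i.toNat + 1)) else acc) acc
      = acc + pvAns l := by
  intro l
  induction l with
  | nil => intro acc; simp [PySem.List.pyRange_one_eq_nil, pvAns]
  | cons c t ih =>
    intro acc
    have hlen : (((c :: t).length : Nat) : Int) = (t.length : Int) + 1 := by
      push_cast [List.length_cons]; ring
    rw [hlen, PySem.List.pyRange_one_cons (by omega), List.foldl_cons]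
    have hhead : (if PySem.List.pyGetD (c :: t) 0 ' ' == '1'
        then acc + pvCZ ((c :: t).drop ((0 : Int).toNat + 1)) else acc)
        = (if c == '1' then acc + pvCZ t else acc) := by
      simp [PySem.List.pyGetD_zero_cons]
    rw [hhead]
    have key : ∀ (a : Int),
        (PySem.List.pyRange (0 + 1) ((t.length : Int) + 1) 1).foldl
          (fun a i => if PySem.List.pyGetD (c :: t) i ' ' == '1'
            then a + pvCZ ((c :: t).drop (i.toNat + 1)) else a) a
        = (PySem.List.pyRange 0 (t.length : Int) 1).foldl
          (fun a i => if PySem.List.pyGetD t i ' ' == '1'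
            then a + pvCZ (t.drop (i.toNat + 1)) else a) a := by
      intro a
      rw [PySem.List.pyRange_one (0 + 1) ((t.length : Int) + 1),
          PySem.List.pyRange_one 0 (t.length : Int)]
      simp only [sub_zero, Int.toNat_natCast, List.foldl_map]
      have hr : ((t.length : Int) + 1 - (0 + 1)).toNat = t.length := by omega
      rw [hr]
      apply PySem.List.foldl_congr_mem
      intro acc k hk
      have h1 : (0 : Int) + 1 + (k : Int) = ((k + 1 : Nat) : Int) := by push_cast; ring
      have h0 : (0 : Int) + (k : Int) = ((k : Nat) : Int) := by norm_num
      rw [h1, h0, PySem.List.pyGetD_natCast, PySem.List.pyGetD_natCast]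
      simp [List.drop_succ_cons]
    rw [key, ih]
    by_cases hc : c = '1'
    · simp [pvAns, hc]; ring
    · simp [pvAns, hc]

lemma pvMaxFold :
    ∀ (l : List Char) (ones m : Int),
    (PySem.List.pyRange 0 (l.length : Int) 1).foldl
      (fun m i => if PySem.List.pyGetD l i ' ' == '0'
        then max m (pvCZ (l.drop (i.toNat + 1)) - (ones + pvCO (l.take i.toNat))) else m) m
      = pvMax ones m l := by
  intro l
  induction l with
  | nil => intro ones m; simp [PySem.List.pyRange_one_eq_nil, pvMax]
  | cons c t ih =>
    intro ones m
    have hlen : (((c :: t).length : Nat) : Int) = (t.length : Int) + 1 := by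
      push_cast [List.length_cons]; ring
    rw [hlen, PySem.List.pyRange_one_cons (by omega), List.foldl_cons]
    have hhead : (if PySem.List.pyGetD (c :: t) 0 ' ' == '0'
        then max m (pvCZ ((c :: t).drop ((0 : Int).toNat + 1)) - (ones + pvCO ((c :: t).take (0 : Int).toNat))) else m)
        = (if c == '0' then max m (pvCZ t - ones) else m) := by
      simp [PySem.List.pyGetD_zero_cons, pvCO]
    rw [hhead]
    have key : ∀ (a : Int),
        (PySem.List.pyRange (0 + 1) ((t.length : Int) + 1) 1).foldl
          (fun a i => if PySem.List.pyGetD (c :: t) i ' ' == '0'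
            then max a (pvCZ ((c :: t).drop (i.toNat + 1)) - (ones + pvCO ((c :: t).take i.toNat))) else a) a
        = (PySem.List.pyRange 0 (t.length : Int) 1).foldl
          (fun a i => if PySem.List.pyGetD t i ' ' == '0'
            then max a (pvCZ (t.drop (i.toNat + 1)) - ((ones + (if c == '1' then 1 else 0)) + pvCO (t.take i.toNat))) else a) a := by
      intro a
      rw [PySem.List.pyRange_one (0 + 1) ((t.length : Int) + 1),
          PySem.List.pyRange_one 0 (t.length : Int)]
      simp only [sub_zero, Int.toNat_natCast, List.foldl_map]
      have hr : ((t.length : Int) + 1 - (0 + 1)).toNat = t.length := by omega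
      rw [hr]
      apply PySem.List.foldl_congr_mem
      intro acc k hk
      have h1 : (0 : Int) + 1 + (k : Int) = ((k + 1 : Nat) : Int) := by push_cast; ring
      have h0 : (0 : Int) + (k : Int) = ((k : Nat) : Int) := by norm_num
      rw [h1, h0, PySem.List.pyGetD_natCast, PySem.List.pyGetD_natCast]
      simp only [Int.toNat_natCast]
      have htake : pvCO ((c :: t).take (k + 1)) = (if c == '1' then 1 else 0) + pvCO (t.take k) := by
        simp [pvCO, List.count_cons]
        by_cases hc1 : c = '1' <;> simp [hc1] <;> ring
      rw [htake]
      simp [List.drop_succ_cons]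
      ring_nf
    rw [key, ih]
    by_cases hc0 : c = '0'
    · have : (ones + (if c == '1' then 1 else 0)) = ones := by simp [hc0]
      rw [this]
      simp [pvMax, hc0]
    · by_cases hc1 : c = '1'
      · simp [pvMax, hc0, hc1]
      · simp [pvMax, hc0, hc1]

lemma pvBinv (total : Int) :
    ∀ (l : List Char) (ans best ones zeros : Int), total = zeros + pvCZ l →
    (l.foldl
      (fun (st : Int × Int × Int × Int) c =>
        if c == '1' then (st.1 + (total - st.2.2.2), st.2.1, st.2.2.1 + 1, st.2.2.2)
        else if c == '0' then (st.1, max st.2.1 (total - (st.2.2.2 + 1) - st.2.2.1), st.2.2.1, st.2.2.2 + 1)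
        else st) (ans, best, ones, zeros))
      = (ans + pvAns l, pvMax ones best l, ones + pvCO l, zeros + pvCZ l) := by
  intro l
  induction l with
  | nil => intro ans best ones zeros h; simp [pvAns, pvMax, pvCZ, pvCO]
  | cons c t ih =>
    intro ans best ones zeros h
    rw [pvCZ_cons] at h
    rw [List.foldl_cons]
    by_cases h1 : c = '1'
    · subst h1
      refine (ih (ans + (total - zeros)) best (ones + 1) zeros (by simp at h; omega)).trans ?_
      have ht : total - zeros = pvCZ t := by simp at h; omega
      simp only [pvAns, pvMax, pvCZ_cons, pvCO_cons, Prod.ext_iff]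
      refine ⟨by rw [ht]; simp; ring, by simp, by simp; ring, by simp⟩
    · by_cases h0 : c = '0'
      · subst h0
        refine (ih ans (max best (total - (zeros + 1) - ones)) ones (zeros + 1)
          (by simp at h; omega)).trans ?_
        have ht : total - (zeros + 1) - ones = pvCZ t - ones := by simp at h; omega
        simp only [pvAns, pvMax, pvCZ_cons, pvCO_cons, Prod.ext_iff]
        refine ⟨by simp, by rw [ht]; simp, by simp, by simp; ring⟩
      · rw [if_neg (by simp [h1]), if_neg (by simp [h0])]
        refine (ih ans best ones zeros (by simp [h0] at h; omega)).trans ?_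
        simp only [pvAns, pvMax, pvCZ_cons, pvCO_cons, Prod.ext_iff]
        refine ⟨by simp [h1], by simp [h0, h1], by simp [h1], by simp [h0]⟩

lemma pvZsuf_getD (l : List Char) (hl : l ≠ []) :
    ∀ i : Nat, i ≤ l.length →
      PySem.List.pyGetD (pvZsuf l (l.length : Int)) (i : Int) 0 = pvCZ (l.drop i) := by
  have hN : 1 ≤ l.length := List.length_pos_of_ne_nil hl
  unfold pvZsuf
  rw [show (l.length : Int) - 2 = ((l.length - 1 : Nat) : Int) - 1 by omega]
  refine pvZfold l (l.length - 1) (by omega) _ ?_ ?_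
  · rw [show (l.length : Int) + 1 = ((l.length + 1 : Nat) : Int) by push_cast; ring,
        pvRepl (l.length + 1) [], show (l.length : Int) - 1 = ((l.length - 1 : Nat) : Int) by omega,
        PySem.List.pySetD_natCast]
    simp
  · intro i hi1 hi2
    rw [show (l.length : Int) + 1 = ((l.length + 1 : Nat) : Int) by push_cast; ring,
        pvRepl (l.length + 1) [], show (l.length : Int) - 1 = ((l.length - 1 : Nat) : Int) by omega,
        PySem.List.pySetD_natCast, PySem.List.pyGetD_natCast]
    simp only [List.nil_append]
    by_cases hil : i = l.length - 1
    · subst hil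
      rw [List.getD_eq_getElem _ _ (by simp only [List.length_set, List.length_replicate]; omega),
          List.getElem_set_self]
      rw [PySem.List.pyGetD_natCast]
      rw [pvCZ_drop l (l.length - 1) (by omega), show l.length - 1 + 1 = l.length by omega]
      simp [pvCZ]
    · have hil' : i = l.length := by omega
      subst hil'
      rw [List.getD_eq_getElem _ _ (by simp only [List.length_set, List.length_replicate]; omega),
          List.getElem_set_ne (by omega)]
      simp [pvCZ, List.getElem_replicate]

lemma pvOpre_getD (l : List Char) (hl : l ≠ []) :
    ∀ i : Nat, i < l.length →
      PySem.List.pyGetD (pvOpre l (l.length : Int)) (i : Int) 0 = pvCO (l.take (i + 1)) := by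
  have hN : 1 ≤ l.length := List.length_pos_of_ne_nil hl
  unfold pvOpre
  rw [show (PySem.List.pyRange 1 ((l.length : Int)) 1)
        = (PySem.List.pyRange (((1 : Nat) : Int)) ((l.length : Int)) 1) by norm_num]
  refine pvOfold l (l.length - 1) 1 (by omega) (by omega) _ ?_ ?_
  · rw [pvRepl l.length [],
        show (PySem.List.pySetD (([] : List Int) ++ List.replicate l.length 0) 0
              (pvB2i (PySem.List.pyGetD l 0 ' ' == '1')))
          = (PySem.List.pySetD (([] : List Int) ++ List.replicate l.length 0) (((0 : Nat) : Int))
              (pvB2i (PySem.List.pyGetD l 0 ' ' == '1'))) by norm_num,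
        PySem.List.pySetD_natCast]
    simp
  · intro i hi
    have hi0 : i = 0 := by omega
    subst hi0
    rw [pvRepl l.length [],
        show (PySem.List.pySetD (([] : List Int) ++ List.replicate l.length 0) 0
              (pvB2i (PySem.List.pyGetD l 0 ' ' == '1')))
          = (PySem.List.pySetD (([] : List Int) ++ List.replicate l.length 0) (((0 : Nat) : Int))
              (pvB2i (PySem.List.pyGetD l 0 ' ' == '1'))) by norm_num,
        PySem.List.pySetD_natCast, PySem.List.pyGetD_natCast]
    simp only [List.nil_append]
    rw [List.getD_eq_getElem _ _ (by simp only [List.length_set, List.length_replicate]; omega),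
        List.getElem_set_self]
    rw [pvCO_take l 0 (by omega), PySem.List.pyGetD_zero]
    simp [pvCO]

lemma pvInitial_eq (l : List Char) (hl : l ≠ []) :
    pvInitial l (pvZsuf l (l.length : Int)) (l.length : Int) = pvAns l := by
  unfold pvInitial
  have hcg : ∀ (acc : Int), ∀ i ∈ PySem.List.pyRange 0 (l.length : Int) 1,
      (if PySem.List.pyGetD l i ' ' == '1'
        then acc + PySem.List.pyGetD (pvZsuf l (l.length : Int)) (i + 1) 0 else acc)
      = (if PySem.List.pyGetD l i ' ' == '1'
        then acc + pvCZ (l.drop (i.toNat + 1)) else acc) := by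
    intro acc i hi
    rw [PySem.List.mem_pyRange_one] at hi
    by_cases hc : (PySem.List.pyGetD l i ' ' == '1') = true
    · simp only [hc, if_true]
      rw [show i + 1 = ((i.toNat + 1 : Nat) : Int) by omega,
          pvZsuf_getD l hl (i.toNat + 1) (by omega)]
    · simp only [eq_false_of_ne_true hc, if_false, Bool.false_eq_true]
  rw [PySem.List.foldl_congr_mem _ _ _ _ hcg, pvInitFold]
  ring

lemma pvSt_eq (l : List Char) (hl : l ≠ []) :
    (pvSt l (pvZsuf l (l.length : Int)) (pvOpre l (l.length : Int)) (l.length : Int)).1 = pvMax 0 0 l := by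
  have hN : 1 ≤ l.length := List.length_pos_of_ne_nil hl
  unfold pvSt
  rw [pvFoldFst (PySem.List.pyRange 0 (l.length : Int) 1)
        (fun i => PySem.List.pyGetD l i ' ' == '0')
        (fun i => if i == (l.length : Int) - 1 then 0 else PySem.List.pyGetD (pvZsuf l (l.length : Int)) (i + 1) 0)
        (fun i => if i == 0 then 0 else PySem.List.pyGetD (pvOpre l (l.length : Int)) (i - 1) 0)
        (0, 0, 0)]
  have hcg : ∀ (m : Int), ∀ i ∈ PySem.List.pyRange 0 (l.length : Int) 1,
      (if PySem.List.pyGetD l i ' ' == '0'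
        then max m ((if i == (l.length : Int) - 1 then 0
              else PySem.List.pyGetD (pvZsuf l (l.length : Int)) (i + 1) 0) -
            (if i == 0 then 0 else PySem.List.pyGetD (pvOpre l (l.length : Int)) (i - 1) 0)) else m)
      = (if PySem.List.pyGetD l i ' ' == '0'
        then max m (pvCZ (l.drop (i.toNat + 1)) - (0 + pvCO (l.take i.toNat))) else m) := by
    intro m i hi
    rw [PySem.List.mem_pyRange_one] at hi
    by_cases hc : (PySem.List.pyGetD l i ' ' == '0') = true
    · simp only [hc, if_true]
      have hpr : (if i == (l.length : Int) - 1 then 0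
          else PySem.List.pyGetD (pvZsuf l (l.length : Int)) (i + 1) 0)
          = pvCZ (l.drop (i.toNat + 1)) := by
        by_cases hlast : i = (l.length : Int) - 1
        · rw [if_pos (by simp [hlast])]
          rw [show i.toNat + 1 = l.length by omega]
          simp [pvCZ]
        · rw [if_neg (by simp [hlast])]
          rw [show i + 1 = ((i.toNat + 1 : Nat) : Int) by omega,
              pvZsuf_getD l hl (i.toNat + 1) (by omega)]
      have hls : (if i == 0 then 0
          else PySem.List.pyGetD (pvOpre l (l.length : Int)) (i - 1) 0)
          = 0 + pvCO (l.take i.toNat) := by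
        by_cases hz : i = 0
        · rw [if_pos (by simp [hz]), hz]
          simp [pvCO]
        · rw [if_neg (by simp [hz])]
          rw [show i - 1 = ((i.toNat - 1 : Nat) : Int) by omega,
              pvOpre_getD l hl (i.toNat - 1) (by omega),
              show i.toNat - 1 + 1 = i.toNat by omega]
          ring
      rw [hpr, hls]
    · simp only [eq_false_of_ne_true hc, if_false, Bool.false_eq_true]
  rw [PySem.List.foldl_congr_mem _ _ _ _ hcg]
  exact pvMaxFold l 0 0

lemma pvA_eq (s : String) (h : s.toList ≠ []) :
    maximum_subseq s = pvAns s.toList + pvMax 0 0 s.toList := by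
  unfold maximum_subseq
  simp only [PySem.Chars.len_eq]
  rw [pvInitial_eq s.toList h, pvSt_eq s.toList h]

lemma pvB_eq (s : String) :
    maximum_subseq_alt s = pvAns s.toList + pvMax 0 0 s.toList := by
  unfold maximum_subseq_alt
  simp only [PySem.List.foldl_beq_add_one]
  rw [pvBinv (0 + (s.toList.count '0' : Int)) s.toList 0 0 0 0 (by simp [pvCZ])]
  simp

-- ===== VERDICT (by name: the statement is the Claim_ definition above) =====
theorem maximum_subseq_spec : Claim_equal_maximum_subseq := by
  intro s _ hpre
  unfold Spec_maximum_subseq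
  rw [pvA_eq s hpre, pvB_eq s]
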